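-- pv_equiv track=rewrite | github.com/trylek/utils | canon/canon.py | apply_re_shortcuts
-- ===== SOURCE A (Python) =====
-- directive_map = {
--     # call or invoke
--     "C": {"content": r"call|invoke"},
--     # operand
--     #
--     # This is a bit too permissive - should this be the same as "LlvmParser.variable"?
--     # but "variable" doesn't allow integer constants
--     # "O": { "content" : r"(?:%|!)?\d+|(?:%[a-zA-Z.]+(?:[0-9]+[A-Za-z.]+)*)\d*" },
--     #
--     # Some other possibilities:
--     # - Just allow anything -  something like .+ or [^, ]+
--     # - Try to capture the "name" part of an operand so that
--     #   variable123 and variable456 would match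
--     #   but variable123 and broken456 would not.
--     "O": {"content": r"(?:%(?:[A-Za-z0-9]+(?:_|\.?[A-Za-z0-9]*)*))(?:-?\d+|in)?"},
--     # Debug operand
--     "g": {"prefix": r", !dbg !", "content": r"\d+", "numeric": r"%d"},
--     # Register
--     "r": {"content": r"[wxrq](?:\d+|zr)"},  # registers
--     # Vector type elements
--     "V": {"content": r"i\d+|float|double"},
--     # ARM64 memory operand offset ", #123" in "[reg, #123]"
--     "offset": {"prefix": r", #", "content": r"\d+", "numeric": r"%d"},
-- }
--
-- def get_shortcut(key, is_numeric_extract, group_name):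
--     entry = directive_map.get(key)
--     if entry is None:
--         return None
--     has_outer_wrapper = False
--     result = entry["numeric" if is_numeric_extract else "content"]
--     if group_name:
--         result = "(?P<" + group_name + ">" + result + ")"
--         has_outer_wrapper = True
--     prefix = entry.get("prefix")
--     if prefix:
--         result = prefix + result
--         has_outer_wrapper = False
--     if not has_outer_wrapper:
--         result = "(?:" + result + ")"
--     return result
--
-- def apply_re_shortcuts(regex, is_numeric_extract=False, group_name=None):
--     capture_group_added = False
--     index = 0
--     re_parts = []
--
--     while index < len(regex):
--         tilde = regex.find("~", index)
--         if tilde == -1: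
--             break
--
--         re_parts.append(regex[index:tilde])
--
--         next_tilde = regex.find("~", tilde + 1)
--         if next_tilde == -1:
--             raise ValueError("mismatched ~ in re")
--
--         if tilde + 1 == next_tilde:
--             re_parts.append("~")
--             index = tilde + 2
--             continue
--
--         index = next_tilde + 1
--         name = regex[tilde + 1 : next_tilde]
--         value = get_shortcut(name, is_numeric_extract, group_name)
--         if value is None:
--             raise ValueError("Unknown type {}".format(name))
--
--         if group_name:
--             capture_group_added = True
--         re_parts.append(value)
--
--     re_parts.append(regex[index:])
--     return ("".join(re_parts), capture_group_added)
-- ===== SOURCE B (Python) =====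
-- directive_map = {
--     "C": {"content": r"call|invoke"},
--     "O": {"content": r"(?:%(?:[A-Za-z0-9]+(?:_|\.?[A-Za-z0-9]*)*))(?:-?\d+|in)?"},
--     "g": {"prefix": r", !dbg !", "content": r"\d+", "numeric": r"%d"},
--     "r": {"content": r"[wxrq](?:\d+|zr)"},
--     "V": {"content": r"i\d+|float|double"},
--     "offset": {"prefix": r", #", "content": r"\d+", "numeric": r"%d"},
-- }
--
-- def get_shortcut(key, is_numeric_extract, group_name):
--     entry = directive_map.get(key)
--     if entry is None:
--         return None
--     has_outer_wrapper = False
--     result = entry["numeric" if is_numeric_extract else "content"]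
--     if group_name:
--         result = "(?P<" + group_name + ">" + result + ")"
--         has_outer_wrapper = True
--     prefix = entry.get("prefix")
--     if prefix:
--         result = prefix + result
--         has_outer_wrapper = False
--     if not has_outer_wrapper:
--         result = "(?:" + result + ")"
--     return result
--
-- def apply_re_shortcuts(regex, is_numeric_extract=False, group_name=None):
--     def expand(parts):
--         # parts is a non-empty tail of regex.split("~"); returns (expanded, captured)
--         if len(parts) == 1:
--             return parts[0], False
--         if len(parts) == 2:
--             raise ValueError("mismatched ~ in re")
--         lit, name, rest = parts[0], parts[1], parts[2:]
--         if name == "":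
--             tail, cap = expand(rest)
--             return lit + "~" + tail, cap
--         value = get_shortcut(name, is_numeric_extract, group_name)
--         if value is None:
--             raise ValueError("Unknown type {}".format(name))
--         tail, cap = expand(rest)
--         return lit + value + tail, cap or bool(group_name)
--     return expand(regex.split("~"))
-- ===== Notes on version B (the rewrite author's own statement) =====
-- stated objective: alternative
-- what changed: Replaces A's index-based while loop over find('~', index) with an accumulator list and final join by splitting the regex on '~' once and recursing over the (literal, token) pairs of the split, assembling the result back-to-front.
import Mathlib
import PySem

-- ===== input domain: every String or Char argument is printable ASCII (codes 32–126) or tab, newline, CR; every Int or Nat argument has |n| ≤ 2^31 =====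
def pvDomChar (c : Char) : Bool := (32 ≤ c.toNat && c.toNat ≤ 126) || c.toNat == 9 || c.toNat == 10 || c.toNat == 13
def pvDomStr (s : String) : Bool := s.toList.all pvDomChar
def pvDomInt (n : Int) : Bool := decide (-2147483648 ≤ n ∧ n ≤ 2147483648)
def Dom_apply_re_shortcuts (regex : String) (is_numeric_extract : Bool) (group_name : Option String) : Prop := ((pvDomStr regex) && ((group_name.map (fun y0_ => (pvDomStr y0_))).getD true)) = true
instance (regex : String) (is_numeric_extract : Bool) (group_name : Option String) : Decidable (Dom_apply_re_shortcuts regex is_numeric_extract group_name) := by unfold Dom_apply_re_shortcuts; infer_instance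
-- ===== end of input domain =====

-- B re-implements A's index/find scanning loop as split-on-"~" plus a recursion over the
-- token pairs that builds the result back-to-front; same return value wherever A returns.

-- ===== shared module-level helpers (directive_map and get_shortcut appear verbatim in both Pythons) =====

def pvDirectiveMap : PySem.Dict (List Char) (PySem.Dict (List Char) (List Char)) :=
  PySem.Dict.mk
    [("C".toList, PySem.Dict.mk [("content".toList, "call|invoke".toList)]),
     ("O".toList, PySem.Dict.mk [("content".toList, "(?:%(?:[A-Za-z0-9]+(?:_|\\.?[A-Za-z0-9]*)*))(?:-?\\d+|in)?".toList)]),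
     ("g".toList, PySem.Dict.mk [("prefix".toList, ", !dbg !".toList), ("content".toList, "\\d+".toList), ("numeric".toList, "%d".toList)]),
     ("r".toList, PySem.Dict.mk [("content".toList, "[wxrq](?:\\d+|zr)".toList)]),
     ("V".toList, PySem.Dict.mk [("content".toList, "i\\d+|float|double".toList)]),
     ("offset".toList, PySem.Dict.mk [("prefix".toList, ", #".toList), ("content".toList, "\\d+".toList), ("numeric".toList, "%d".toList)])]

-- Python truthiness of the optional group_name string
def pvTruthy (g : Option String) : Bool :=
  match g with
  | none => false
  | some s => !s.toList.isEmpty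

-- get_shortcut; outer `none` = the KeyError Python raises when entry["numeric"] is missing,
-- `some none` = Python's None (unknown key)
def pvGetShortcut (key : List Char) (isNum : Bool) (g : Option String) : Option (Option (List Char)) :=
  match PySem.Dict.get? pvDirectiveMap key with
  | none => some none
  | some entry =>
    match PySem.Dict.get? entry (if isNum then "numeric".toList else "content".toList) with
    | none => none
    | some r0 =>
      let st1 := if pvTruthy g then ("(?P<".toList ++ (g.getD "").toList ++ ">".toList ++ r0 ++ ")".toList, true) else (r0, false)
      let st2 :=
        match PySem.Dict.get? entry "prefix".toList with
        | some p => if !p.isEmpty then (p ++ st1.1, false) else st1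
        | none => st1
      some (some (if !st2.2 then "(?:".toList ++ st2.1 ++ ")".toList else st2.1))

-- ===== PORT A =====

-- A-side termination facts about find and findFrom, cited by the loop below
lemma pvSingletonPrefix (c : Char) (s : List Char) (i : Nat) :
    [c] <+: s.drop i ↔ s[i]? = some c := by
  rw [← List.head?_drop]
  constructor
  · rintro ⟨r, hr⟩
    rw [← hr]; rfl
  · intro hh
    cases hd : s.drop i with
    | nil => rw [hd] at hh; simp at hh
    | cons a t =>
      rw [hd] at hh; simp at hh; subst hh; exact ⟨t, rfl⟩

lemma pvFind_tilde (s : List Char) :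
    PySem.Chars.find s ['~'] =
      if '~' ∈ s then (s.findIdx (· == '~') : Int) else -1 := by
  by_cases hmem : '~' ∈ s
  · simp only [hmem, if_true]
    obtain ⟨l1, l2, rfl⟩ := List.append_of_mem hmem
    have hinfix : ['~'] <:+: l1 ++ '~' :: l2 := ⟨l1, l2, by simp⟩
    have hne : PySem.Chars.find (l1 ++ '~' :: l2) ['~'] ≠ -1 :=
      (PySem.Chars.find_ne_neg_one_iff _ _).2 hinfix
    generalize hs : l1 ++ '~' :: l2 = s at *
    have h0 : 0 ≤ PySem.Chars.find s ['~'] := by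
      have := PySem.Chars.neg_one_le_find s ['~']
      omega
    obtain ⟨hpref, hmin⟩ := PySem.Chars.find_spec h0
    have hk : s[(PySem.Chars.find s ['~']).toNat]? = some '~' := (pvSingletonPrefix _ _ _).1 hpref
    have hj : s.findIdx (· == '~') < s.length := by
      rw [List.findIdx_lt_length]; exact ⟨'~', hmem, by simp⟩
    have hpj : s[s.findIdx (· == '~')] = '~' := by
      have := @List.findIdx_getElem _ (· == '~') s hj
      simpa using this
    have hge : (PySem.Chars.find s ['~']).toNat ≤ s.findIdx (· == '~') := by
      by_contra hlt
      push Not at hlt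
      have : ['~'] <+: s.drop (s.findIdx (· == '~')) := by
        rw [pvSingletonPrefix, List.getElem?_eq_getElem hj, hpj]
      exact hmin _ hlt this
    have hle : s.findIdx (· == '~') ≤ (PySem.Chars.find s ['~']).toNat := by
      by_contra hlt
      push Not at hlt
      have hkl : (PySem.Chars.find s ['~']).toNat < s.length := by
        rw [List.getElem?_eq_some_iff] at hk
        exact hk.1
      have := List.not_of_lt_findIdx hlt (xs := s)
      rw [List.getElem?_eq_getElem hkl] at hk
      simp at hk
      simp at this; exact this hk
    omega
  · simp only [hmem, if_false]
    rw [PySem.Chars.find_eq_neg_one_iff]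
    intro hinfix
    exact hmem (hinfix.mem (by simp))

lemma pvFindFrom_char (cs : List Char) (k : Nat) (hk : k ≤ cs.length) :
    PySem.Chars.findFrom cs ['~'] (k : Int) =
      if '~' ∈ cs.drop k then (((k + (cs.drop k).findIdx (· == '~') : Nat) : Int)) else -1 := by
  rw [PySem.Chars.findFrom_natCast cs ['~'] k hk, pvFind_tilde]
  by_cases hmem : '~' ∈ cs.drop k
  · simp only [hmem, if_true]
    have : ((cs.drop k).findIdx (· == '~') : Int) ≠ -1 := by omega
    simp only [this, if_false]
    push_cast
    ring
  · simp [hmem]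

lemma pvFindIdx_lt (s : List Char) (h : '~' ∈ s) : s.findIdx (· == '~') < s.length := by
  rw [List.findIdx_lt_length]; exact ⟨'~', h, by simp⟩

-- the while loop of A; `none` = one of A's two `raise ValueError` paths
def pvLoopA (cs : List Char) (isNum : Bool) (g : Option String) (index : Nat)
    (parts : List (List Char)) (cap : Bool) : Option (List (List Char) × Bool) :=
  if _h : index < cs.length then
    let tilde := PySem.Chars.findFrom cs ['~'] (index : Int)
    if _h1 : tilde == -1 then some (parts ++ [cs.drop index], cap)
    else
      let parts1 := parts ++ [PySem.Chars.slice cs (some (index : Int)) (some tilde)]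
      let next := PySem.Chars.findFrom cs ['~'] (tilde + 1)
      if _h2 : next == -1 then none
      else if _h3 : tilde + 1 == next then
        pvLoopA cs isNum g (tilde.toNat + 2) (parts1 ++ [['~']]) cap
      else
        let name := PySem.Chars.slice cs (some (tilde + 1)) (some next)
        match pvGetShortcut name isNum g with
        | none => none
        | some none => none
        | some (some v) =>
          pvLoopA cs isNum g (next.toNat + 1) (parts1 ++ [v])
            (if pvTruthy g then true else cap)
  else some (parts ++ [cs.drop index], cap)
termination_by cs.length - index
decreasing_by
  · have h1' : (PySem.Chars.findFrom cs ['~'] (index : Int) == -1) ≠ true := _h1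
    rw [pvFindFrom_char cs index (by omega)] at h1' ⊢
    split at h1'
    case isTrue hmem =>
      rw [if_pos hmem, Int.toNat_natCast]
      omega
    case isFalse => simp at h1'
  · have h1' : (PySem.Chars.findFrom cs ['~'] (index : Int) == -1) ≠ true := _h1
    have h2' : (PySem.Chars.findFrom cs ['~'] (PySem.Chars.findFrom cs ['~'] (index : Int) + 1) == -1) ≠ true := _h2
    rw [pvFindFrom_char cs index (by omega)] at h1' h2' ⊢
    split at h1'
    case isTrue hmem =>
      have hfi := pvFindIdx_lt _ hmem
      rw [List.length_drop] at hfi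
      have ht1 : ((index + (cs.drop index).findIdx (· == '~') : Nat) : Int) + 1
          = ((index + (cs.drop index).findIdx (· == '~') + 1 : Nat) : Int) := by push_cast; ring
      rw [if_pos hmem, ht1, pvFindFrom_char cs _ (by omega)] at h2' ⊢
      split at h2'
      case isTrue hmem2 =>
        rw [if_pos hmem2, Int.toNat_natCast]
        omega
      case isFalse => simp at h2'
    case isFalse => simp at h1'

def apply_re_shortcuts (regex : String) (is_numeric_extract : Bool) (group_name : Option String) : String × Bool :=
  match pvLoopA regex.toList is_numeric_extract group_name 0 [] false with
  | some (ps, c) => (String.ofList (PySem.Chars.join [] ps), c)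
  | none => ("", false)

-- ===== PORT B =====

-- B's recursive `expand` over a tail of regex.split("~"); `none` = a raise in B
def pvExpandB (isNum : Bool) (g : Option String) : List (List Char) → Option (List Char × Bool)
  | [x] => some (x, false)
  | [_, _] => none
  | lit :: name :: r1 :: rest =>
      if name.isEmpty then
        match pvExpandB isNum g (r1 :: rest) with
        | none => none
        | some (tail, cap) => some (lit ++ '~' :: tail, cap)
      else
        match pvGetShortcut name isNum g with
        | none => none
        | some none => none
        | some (some v) =>
          match pvExpandB isNum g (r1 :: rest) with
          | none => none
          | some (tail, cap) => some (lit ++ v ++ tail, cap || pvTruthy g)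
  | [] => none

def apply_re_shortcuts_alt (regex : String) (is_numeric_extract : Bool) (group_name : Option String) : String × Bool :=
  match pvExpandB is_numeric_extract group_name (PySem.Chars.splitOn regex.toList "~".toList) with
  | some (t, c) => (String.ofList t, c)
  | none => ("", false)

-- ===== PRECONDITION & SPEC =====

def pvValidName (name : List Char) (isNum : Bool) : Bool :=
  name.isEmpty ||
  ((if isNum then ["g".toList, "offset".toList]
    else ["C".toList, "O".toList, "g".toList, "r".toList, "V".toList, "offset".toList]).contains name)

-- the shortcut names of a split: every second piece
def pvOddParts : List (List Char) → List (List Char)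
  | _ :: b :: t => b :: pvOddParts t
  | _ => []

-- Pre_ = exactly the inputs where Python A returns: an even number of '~' (odd split length)
-- and every shortcut token either empty (the escaped-tilde case) or a known key with the requested field.
def Pre_apply_re_shortcuts (regex : String) (is_numeric_extract : Bool) (group_name : Option String) : Prop :=
  (PySem.Chars.splitOn regex.toList "~".toList).length % 2 = 1 ∧
  ∀ nm ∈ pvOddParts (PySem.Chars.splitOn regex.toList "~".toList), pvValidName nm is_numeric_extract = true

instance (regex : String) (is_numeric_extract : Bool) (group_name : Option String) : Decidable (Pre_apply_re_shortcuts regex is_numeric_extract group_name) := by unfold Pre_apply_re_shortcuts; infer_instance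

def pvWitness_apply_re_shortcuts : String × Bool × Option String := ("a~C~b~~c", false, some "grp")

def Spec_apply_re_shortcuts (regex : String) (is_numeric_extract : Bool) (group_name : Option String) (out : String × Bool) : Prop := out = apply_re_shortcuts_alt regex is_numeric_extract group_name
instance (regex : String) (is_numeric_extract : Bool) (group_name : Option String) (out : String × Bool) : Decidable (Spec_apply_re_shortcuts regex is_numeric_extract group_name out) := by unfold Spec_apply_re_shortcuts; infer_instance

-- ===== CLAIM (what is proved, stated in full; the proofs are below) =====
def Claim_equal_apply_re_shortcuts : Prop := ∀ (regex : String) (is_numeric_extract : Bool) (group_name : Option String), Dom_apply_re_shortcuts regex is_numeric_extract group_name → Pre_apply_re_shortcuts regex is_numeric_extract group_name → Spec_apply_re_shortcuts regex is_numeric_extract group_name (apply_re_shortcuts regex is_numeric_extract group_name)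

-- ===== LEMMAS AND PROOFS =====

-- structural model of s.split("~")
def pvMySplit : List Char → List (List Char)
  | [] => [[]]
  | c :: t =>
    if c = '~' then [] :: pvMySplit t
    else
      match pvMySplit t with
      | [] => [[c]]
      | h :: r => (c :: h) :: r

lemma pvMySplit_ne_nil (s : List Char) : pvMySplit s ≠ [] := by
  cases s with
  | nil => simp [pvMySplit]
  | cons c t =>
    simp only [pvMySplit]
    split
    · simp
    · split <;> simp

lemma pvTildeList : "~".toList = ['~'] := rfl

lemma pvGo_spec (fuel : Nat) : ∀ (l cur : List Char) (acc : List (List Char)), l.length < fuel →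
    PySem.Chars.splitOn.go ['~'] fuel l cur acc =
      acc.reverse ++ (match pvMySplit l with
        | [] => [cur.reverse]
        | h :: r => (cur.reverse ++ h) :: r) := by
  induction fuel with
  | zero => intro l cur acc h; omega
  | succ f ih =>
    intro l cur acc h
    cases l with
    | nil =>
      rw [PySem.Chars.splitOn.go]
      simp [pvMySplit]
      omega
    | cons c rest =>
      rw [PySem.Chars.splitOn.go]
      simp only [List.length_cons] at h
      by_cases hc : c = '~'
      · subst hc
        have hpre : List.isPrefixOf ['~'] ('~' :: rest) = true := by
          simp [List.isPrefixOf]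
        simp only [hpre, if_true, List.length_singleton, List.drop_succ_cons, List.drop_zero]
        rw [ih rest [] ((cur.reverse) :: acc) (by omega)]
        cases hms : pvMySplit rest with
        | nil => exact absurd hms (pvMySplit_ne_nil rest)
        | cons mh mr => simp [pvMySplit, hms]
      · have hpre : List.isPrefixOf ['~'] (c :: rest) = false := by
          simp [List.isPrefixOf]
          exact fun hh => absurd hh.symm hc
        simp only [hpre, Bool.false_eq_true, if_false]
        rw [ih rest (c :: cur) acc (by omega)]
        cases hms : pvMySplit rest with
        | nil => exact absurd hms (pvMySplit_ne_nil rest)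
        | cons mh mr => simp [pvMySplit, hms, hc]

lemma pvSplitOn_eq_mySplit (cs : List Char) :
    PySem.Chars.splitOn cs "~".toList = pvMySplit cs := by
  unfold PySem.Chars.splitOn
  rw [pvTildeList, pvGo_spec (cs.length + 1) cs [] [] (by omega)]
  cases hms : pvMySplit cs with
  | nil => exact absurd hms (pvMySplit_ne_nil cs)
  | cons mh mr => simp

lemma pvJoin_nil (ps : List (List Char)) : PySem.Chars.join [] ps = ps.flatten := by
  unfold PySem.Chars.join List.intercalate
  induction ps with
  | nil => rfl
  | cons h t ih =>
    cases t with
    | nil => simp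
    | cons h2 t2 => simp_all [List.intersperse]

lemma pvMySplit_no_tilde (s : List Char) (h : '~' ∉ s) : pvMySplit s = [s] := by
  induction s with
  | nil => rfl
  | cons c t ih =>
    simp only [List.mem_cons, not_or] at h
    have hc : ¬ c = '~' := fun h' => h.1 h'.symm
    simp [pvMySplit, hc, ih h.2]

lemma pvMySplit_split (s : List Char) (h : '~' ∈ s) :
    pvMySplit s = s.take (s.findIdx (· == '~')) :: pvMySplit (s.drop (s.findIdx (· == '~') + 1)) := by
  induction s with
  | nil => simp at h
  | cons c t ih =>
    by_cases hc : c = '~'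
    · subst hc
      simp [pvMySplit, List.findIdx_cons]
    · have ht : '~' ∈ t := by
        rcases List.mem_cons.mp h with h' | h'
        · exact absurd h'.symm hc
        · exact h'
      have : (c == '~') = false := by simp [hc]
      simp [pvMySplit, List.findIdx_cons, this, hc, ih ht]

-- main invariant: A's loop from `index` computes B's expansion of the split of the suffix
lemma pvMain (cs : List Char) (isNum : Bool) (g : Option String) :
    ∀ (n index : Nat) (parts : List (List Char)) (cap : Bool), cs.length - index ≤ n →
    Option.map (fun pc : List (List Char) × Bool => (pc.1.flatten, pc.2)) (pvLoopA cs isNum g index parts cap)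
      = Option.map (fun tc : List Char × Bool => (parts.flatten ++ tc.1, cap || tc.2))
          (pvExpandB isNum g (pvMySplit (cs.drop index))) := by
  intro n
  induction n with
  | zero =>
    intro index parts cap h
    have hge : cs.length ≤ index := by omega
    rw [pvLoopA, dif_neg (by omega), List.drop_of_length_le hge]
    simp [pvMySplit, pvExpandB, List.flatten_append]
  | succ n ih =>
    intro index parts cap h
    by_cases hidx : index < cs.length
    · rw [pvLoopA, dif_pos hidx]
      by_cases hmem : '~' ∈ cs.drop index
      · rw [pvFindFrom_char cs index (by omega), if_pos hmem]
        set fN := (cs.drop index).findIdx (· == '~') with hfN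
        have hfi : fN < cs.length - index := by
          have := pvFindIdx_lt _ hmem
          rwa [List.length_drop] at this
        have hne1 : ((((index + fN : Nat) : Int)) == -1) = false := by
          simp only [beq_eq_false_iff_ne, ne_eq]
          omega
        rw [dif_neg (by simp; omega)]
        have ht1 : (((index + fN : Nat) : Int)) + 1 = (((index + fN + 1 : Nat) : Int)) := by push_cast; ring
        rw [ht1, pvFindFrom_char cs (index + fN + 1) (by omega)]
        by_cases hmem2 : '~' ∈ cs.drop (index + fN + 1)
        · rw [if_pos hmem2]
          set d2 := cs.drop (index + fN + 1) with hd2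
          set f2 := d2.findIdx (· == '~') with hf2
          have hfi2 : f2 < cs.length - (index + fN + 1) := by
            have := pvFindIdx_lt _ hmem2
            rw [List.length_drop] at this
            omega
          rw [dif_neg (by simp; omega)]
          have hdd : (cs.drop index).drop (fN + 1) = d2 := by
            rw [List.drop_drop]
            have he : index + (fN + 1) = index + fN + 1 := by omega
            rw [he]
          by_cases hf20 : f2 = 0
          · rw [dif_pos (by simp; omega)]
            rw [Int.toNat_natCast]
            have hslice : PySem.Chars.slice cs (some (index : Int)) (some ((index + fN : Nat) : Int))
                = (cs.drop index).take fN := by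
              rw [PySem.Chars.slice_eq_listSlice, PySem.List.slice_natCast]
              simp
            rw [hslice, ih (index + fN + 2) _ _ (by omega)]
            rw [pvMySplit_split _ hmem, ← hfN, hdd, pvMySplit_split _ hmem2, ← hf2, hf20]
            have hdd2 : d2.drop (0 + 1) = cs.drop (index + fN + 2) := by
              rw [hd2, List.drop_drop]
            rw [hdd2]
            cases hms : pvMySplit (cs.drop (index + fN + 2)) with
            | nil => exact absurd hms (pvMySplit_ne_nil _)
            | cons mh mr =>
              cases hE : pvExpandB isNum g (mh :: mr) with
              | none => simp [pvExpandB, hE]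
              | some tc =>
                obtain ⟨tail, c⟩ := tc
                simp [pvExpandB, hE, List.flatten_append]
          · rw [dif_neg (by simp; omega)]
            have hslice : PySem.Chars.slice cs (some (index : Int)) (some ((index + fN : Nat) : Int))
                = (cs.drop index).take fN := by
              rw [PySem.Chars.slice_eq_listSlice, PySem.List.slice_natCast]
              simp
            have hslice2 : PySem.Chars.slice cs (some ((index + fN + 1 : Nat) : Int)) (some ((index + fN + 1 + f2 : Nat) : Int))
                = d2.take f2 := by
              rw [PySem.Chars.slice_eq_listSlice, PySem.List.slice_natCast, hd2]
              have he : index + fN + 1 + f2 - (index + fN + 1) = f2 := by omega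
              rw [he]
            rw [hslice, hslice2]
            have hnm : (d2.take f2).isEmpty = false := by
              have hd2ne : d2 ≠ [] := by
                intro hnil
                rw [hnil] at hmem2
                simp at hmem2
              simp [List.take_eq_nil_iff, hf20, hd2ne]
            rw [pvMySplit_split _ hmem, ← hfN, hdd, pvMySplit_split _ hmem2, ← hf2]
            have hdd2 : d2.drop (f2 + 1) = cs.drop (index + fN + f2 + 2) := by
              rw [hd2, List.drop_drop]
              have he : index + fN + 1 + (f2 + 1) = index + fN + f2 + 2 := by omega
              rw [he]
            rw [hdd2]
            cases hgs : pvGetShortcut (d2.take f2) isNum g with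
            | none =>
              cases hms : pvMySplit (cs.drop (index + fN + f2 + 2)) with
              | nil => exact absurd hms (pvMySplit_ne_nil _)
              | cons mh mr => simp [pvExpandB, hnm, hgs]
            | some vo =>
              cases vo with
              | none =>
                cases hms : pvMySplit (cs.drop (index + fN + f2 + 2)) with
                | nil => exact absurd hms (pvMySplit_ne_nil _)
                | cons mh mr => simp [pvExpandB, hnm, hgs]
              | some v =>
                rw [Int.toNat_natCast]
                simp only [hgs]
                have harg : index + fN + 1 + f2 + 1 = index + fN + f2 + 2 := by omega
                rw [harg, ih (index + fN + f2 + 2) _ _ (by omega)]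
                cases hms : pvMySplit (cs.drop (index + fN + f2 + 2)) with
                | nil => exact absurd hms (pvMySplit_ne_nil _)
                | cons mh mr =>
                  cases hE : pvExpandB isNum g (mh :: mr) with
                  | none => simp [pvExpandB, hnm, hgs, hE]
                  | some tc =>
                    obtain ⟨tail, c⟩ := tc
                    simp [pvExpandB, hnm, hgs, hE, List.flatten_append]
                    cases pvTruthy g <;> cases cap <;> cases c <;> simp
        · rw [if_neg hmem2, dif_pos (by simp)]
          rw [pvMySplit_split _ hmem, ← hfN]
          have hdd : (cs.drop index).drop (fN + 1) = cs.drop (index + fN + 1) := by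
            rw [List.drop_drop]; ring_nf
          rw [hdd, pvMySplit_no_tilde _ hmem2]
          simp [pvExpandB]
      · rw [pvFindFrom_char cs index (by omega), if_neg hmem]
        simp [pvMySplit_no_tilde _ hmem, pvExpandB, List.flatten_append]
    · rw [pvLoopA, dif_neg hidx, List.drop_of_length_le (by omega)]
      simp [pvMySplit, pvExpandB, List.flatten_append]

-- ===== VERDICT (by name: the statement is the Claim_ definition above) =====
theorem apply_re_shortcuts_spec : Claim_equal_apply_re_shortcuts := by
  intro regex isNum g _ _
  unfold Spec_apply_re_shortcuts apply_re_shortcuts apply_re_shortcuts_alt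
  rw [pvSplitOn_eq_mySplit]
  have h := pvMain regex.toList isNum g regex.toList.length 0 [] false (by omega)
  simp only [List.drop_zero] at h
  cases hB : pvExpandB isNum g (pvMySplit regex.toList) with
  | none =>
    rw [hB] at h
    simp only [Option.map_eq_none_iff, Option.map_none] at h
    rw [h]
  | some tc =>
    rw [hB] at h
    cases hA : pvLoopA regex.toList isNum g 0 [] false with
    | none => rw [hA] at h; simp at h
    | some pc =>
      rw [hA] at h
      simp only [Option.map_some, Option.some.injEq, Prod.mk.injEq, List.flatten_nil,
        List.nil_append, Bool.false_or] at h
      simp only [pvJoin_nil, h.1, h.2]
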